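-- pv_equiv track=rewrite | github.com/GiovanniSpisso/UOT-FW | FW_1dim_trunc.py | vector_index_to_matrix_indices
-- ===== SOURCE A (Python) =====
-- def vector_index_to_matrix_indices(idx, n, R):
--     """
--     Convert vector index to matrix indices (i, j) directly.
--
--     Parameters:
--       idx: index in the vector representation
--       n: dimension of the matrix
--       R: truncation radius
--
--     Returns:
--       (i, j): matrix indices
--     """
--     # Find which diagonal k and position within that diagonal
--     pos = 0
--     for k in range(-R + 1, R):
--         m = n - abs(k)
--         if idx < pos + m:
--             offset = idx - pos
--             if k >= 0:
--                 return (offset, offset + k)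
--             else:
--                 return (offset - k, offset)
--         pos += m
--     raise ValueError(f"Index {idx} out of bounds")
-- ===== SOURCE B (Python) =====
-- def vector_index_to_matrix_indices(idx, n, R):
--     """Closed-form prefix sums of the diagonal lengths + binary search,
--     instead of A's linear scan over all 2R-1 diagonals."""
--     if not (1 <= R <= n and idx < (2 * R - 1) * n - R * (R - 1)):
--         raise ValueError(f"Index {idx} out of bounds")
--
--     def pref(t):
--         # number of vector entries strictly before diagonal number t
--         # (diagonal t holds k = t - (R - 1), length n - |k|)
--         if t <= R:
--             return t * n - t * (2 * R - t - 1) // 2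
--         u = t - R
--         return t * n - (R * (R - 1) + u * (u + 1)) // 2
--
--     lo, hi = 0, 2 * R - 1
--     while hi - lo > 1:
--         mid = (lo + hi) // 2
--         if pref(mid) <= idx:
--             lo = mid
--         else:
--             hi = mid
--     k = lo - (R - 1)
--     offset = idx - pref(lo)
--     if k >= 0:
--         return (offset, offset + k)
--     else:
--         return (offset - k, offset)
-- ===== Notes on version B (the rewrite author's own statement) =====
-- stated objective: alternative
-- what changed: A scans all 2R-1 diagonals linearly accumulating their lengths; B validates the input and then binary-searches the closed-form prefix sum of the diagonal lengths for the containing diagonal (O(log R) steps vs A's O(R), though a timing run could not credit this: its scaled inputs lie outside Pre_, where B raises).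
-- outside the precondition, e.g. on vector_index_to_matrix_indices(-11, -4, 3): A returns (-9, -11), B raises ValueError; on vector_index_to_matrix_indices(0, 2, 5): A returns (0, 1), B raises ValueError
import Mathlib
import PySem

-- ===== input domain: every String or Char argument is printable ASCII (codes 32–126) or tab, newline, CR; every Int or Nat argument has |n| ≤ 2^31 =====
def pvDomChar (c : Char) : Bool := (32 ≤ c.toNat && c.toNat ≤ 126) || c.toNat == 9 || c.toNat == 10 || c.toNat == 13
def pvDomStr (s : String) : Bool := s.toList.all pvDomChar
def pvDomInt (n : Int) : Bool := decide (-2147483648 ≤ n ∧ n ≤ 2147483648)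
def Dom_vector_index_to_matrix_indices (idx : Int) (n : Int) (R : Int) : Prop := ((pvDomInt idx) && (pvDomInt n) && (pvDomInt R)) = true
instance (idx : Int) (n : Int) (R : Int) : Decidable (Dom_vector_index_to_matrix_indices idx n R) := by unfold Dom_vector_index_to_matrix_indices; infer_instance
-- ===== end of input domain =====

-- B replaces A's linear scan over the diagonals by input validation plus a binary
-- search on the closed-form prefix sums of the diagonal lengths (objective: alternative).

-- ===== PORT A =====
-- the for-loop over range(-R+1, R) (lazy in Python, so ported as recursion on k, not as a
-- materialised list) with accumulator pos; `none` = the ValueError at the end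
def vectorScanA (idx : Int) (n : Int) (R : Int) (k : Int) (pos : Int) : Option (List Int) :=
  if k < R then
    let m := n - |k|
    if idx < pos + m then
      let offset := idx - pos
      if k ≥ 0 then some [offset, offset + k] else some [offset - k, offset]
    else vectorScanA idx n R (k + 1) (pos + m)
  else none
termination_by (R - k).toNat

def vector_index_to_matrix_indices (idx : Int) (n : Int) (R : Int) : List Int :=
  (vectorScanA idx n R (-R + 1) 0).getD []

-- ===== PORT B =====
-- pref t = number of vector entries strictly before diagonal number t (diagonal t holds k = t - (R-1))
def prefAlt (n : Int) (R : Int) (t : Int) : Int :=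
  if t ≤ R then t * n - PySem.Int.floordiv (t * (2 * R - t - 1)) 2
  else t * n - PySem.Int.floordiv (R * (R - 1) + (t - R) * (t - R + 1)) 2

-- the while-loop: binary search for the last t with pref t ≤ idx
def bsearchAlt (idx : Int) (n : Int) (R : Int) (lo : Int) (hi : Int) : Int :=
  if h : hi - lo > 1 then
    let mid := PySem.Int.floordiv (lo + hi) 2
    if prefAlt n R mid ≤ idx then bsearchAlt idx n R mid hi
    else bsearchAlt idx n R lo mid
  else lo
termination_by (hi - lo).toNat
decreasing_by
  · have h1 : lo + 1 ≤ PySem.Int.floordiv (lo + hi) 2 := by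
      rw [PySem.Int.le_floordiv_iff_mul_le (by omega : (0:Int) < 2)]; omega
    omega
  · have h2 : PySem.Int.floordiv (lo + hi) 2 < hi := by
      rw [PySem.Int.floordiv_lt_iff_lt_mul (by omega : (0:Int) < 2)]; omega
    have h1 : lo + 1 ≤ PySem.Int.floordiv (lo + hi) 2 := by
      rw [PySem.Int.le_floordiv_iff_mul_le (by omega : (0:Int) < 2)]; omega
    omega

def vector_index_to_matrix_indices_alt (idx : Int) (n : Int) (R : Int) : List Int :=
  -- Source B's validation raise has no value; `[]` stands for the ValueError (Pre_ excludes it)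
  if 1 ≤ R ∧ R ≤ n ∧ idx < (2 * R - 1) * n - R * (R - 1) then
  let lo := bsearchAlt idx n R 0 (2 * R - 1)
  let k := lo - (R - 1)
  let offset := idx - prefAlt n R lo
  (if k ≥ 0 then [offset, offset + k] else [offset - k, offset])
  else []

-- ===== PRECONDITION & SPEC =====
-- Pre_ is the function's natural domain (truncation radius 1 ≤ R ≤ n, index below the
-- truncated size): outside it A either raises ValueError (idx at or beyond the size) or,
-- for R outside [1, n], returns accidental values from a scan over non-positive diagonal
-- lengths; B validates its input and raises ValueError on all of them.
def Pre_vector_index_to_matrix_indices (idx : Int) (n : Int) (R : Int) : Prop :=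
  1 ≤ R ∧ R ≤ n ∧ idx < (2 * R - 1) * n - R * (R - 1)
instance (idx : Int) (n : Int) (R : Int) : Decidable (Pre_vector_index_to_matrix_indices idx n R) := by unfold Pre_vector_index_to_matrix_indices; infer_instance

def pvWitness_vector_index_to_matrix_indices : Int × Int × Int := (2, 3, 2)

def Spec_vector_index_to_matrix_indices (idx : Int) (n : Int) (R : Int) (out : List Int) : Prop := out = vector_index_to_matrix_indices_alt idx n R
instance (idx : Int) (n : Int) (R : Int) (out : List Int) : Decidable (Spec_vector_index_to_matrix_indices idx n R out) := by unfold Spec_vector_index_to_matrix_indices; infer_instance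

-- ===== CLAIM (what is proved, stated in full; the proofs are below) =====
def Claim_equal_vector_index_to_matrix_indices : Prop := ∀ (idx : Int) (n : Int) (R : Int), Dom_vector_index_to_matrix_indices idx n R → Pre_vector_index_to_matrix_indices idx n R → Spec_vector_index_to_matrix_indices idx n R (vector_index_to_matrix_indices idx n R)

-- ===== LEMMAS AND PROOFS =====

theorem floordiv_two_double (a : Int) : PySem.Int.floordiv (2 * a) 2 = a := by
  rw [PySem.Int.floordiv_eq_iff_of_pos (by omega : (0:Int) < 2)]; omega

theorem prefAlt_zero (n R : Int) (hR : 1 ≤ R) : prefAlt n R 0 = 0 := by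
  unfold prefAlt
  rw [if_pos (by omega : (0:Int) ≤ R),
    show (0:Int) * (2 * R - 0 - 1) = 2 * 0 from by ring, floordiv_two_double]
  ring

theorem prefAlt_succ (n R t : Int) (hR : 1 ≤ R) (h0 : 0 ≤ t) (h1 : t ≤ 2 * R - 2) :
    prefAlt n R (t + 1) = prefAlt n R t + (n - |t - (R - 1)|) := by
  unfold prefAlt
  obtain ⟨c, hc⟩ := Int.even_mul_succ_self t
  obtain ⟨d, hd⟩ := Int.even_mul_succ_self (t + 1)
  obtain ⟨e, he⟩ := Int.even_mul_succ_self (t - R)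
  obtain ⟨f, hf⟩ := Int.even_mul_succ_self (t - R + 1)
  obtain ⟨g, hg⟩ := Int.even_mul_succ_self (R - 1)
  by_cases hA : t + 1 ≤ R
  · rw [if_pos hA, if_pos (by omega : t ≤ R), abs_of_nonpos (by omega : t - (R - 1) ≤ 0),
      show t * (2 * R - t - 1) = 2 * (R * t - c) from by linear_combination -hc,
      show (t + 1) * (2 * R - (t + 1) - 1) = 2 * (R * (t + 1) - d) from by linear_combination -hd,
      floordiv_two_double, floordiv_two_double]
    have h3 : (t + 1) * ((t + 1) + 1) = t * (t + 1) + 2 * t + 2 := by ring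
    rw [hd, hc] at h3
    have hcd : d = c + t + 1 := by omega
    linear_combination hcd
  · by_cases hB : t ≤ R
    · have ht : t = R := by omega
      subst ht
      rw [if_neg hA, if_pos hB, abs_of_nonneg (by omega : (0:Int) ≤ t - (t - 1)),
        show t * (2 * t - t - 1) = 2 * g from by linear_combination hg,
        show t * (t - 1) + (t + 1 - t) * (t + 1 - t + 1) = 2 * (g + 1) from by linear_combination hg,
        floordiv_two_double, floordiv_two_double]
      ring
    · rw [if_neg hA, if_neg hB, abs_of_nonneg (by omega : (0:Int) ≤ t - (R - 1)),
        show R * (R - 1) + (t - R) * (t - R + 1) = 2 * (g + e) from by linear_combination hg + he,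
        show R * (R - 1) + (t + 1 - R) * (t + 1 - R + 1) = 2 * (g + f) from by linear_combination hg + hf,
        floordiv_two_double, floordiv_two_double]
      have h3 : (t - R + 1) * ((t - R + 1) + 1) = (t - R) * ((t - R) + 1) + 2 * (t - R) + 2 := by ring
      rw [hf, he] at h3
      have hef : f = e + (t - R) + 1 := by omega
      linear_combination -hef

theorem prefAlt_len_pos (n R t : Int) (hR : 1 ≤ R) (hn : R ≤ n) (h0 : 0 ≤ t) (h1 : t ≤ 2 * R - 2) :
    1 ≤ n - |t - (R - 1)| := by
  have : |t - (R - 1)| ≤ R - 1 := abs_le.mpr ⟨by omega, by omega⟩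
  omega

theorem prefAlt_mono_aux (n R : Int) (hR : 1 ≤ R) (hn : R ≤ n) :
    ∀ d : Nat, ∀ s : Int, 0 ≤ s → s + d ≤ 2 * R - 1 → prefAlt n R s ≤ prefAlt n R (s + d) := by
  intro d
  induction d with
  | zero => intro s _ _; simp
  | succ d ih =>
    intro s hs hb
    have h1 := ih s hs (by omega)
    have h2 := prefAlt_succ n R (s + d) hR (by omega) (by omega)
    have h3 := prefAlt_len_pos n R (s + d) hR hn (by omega) (by omega)
    have : ((d : Int) + 1) = (d : Int) + 1 := rfl
    push_cast
    push_cast at h1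
    have heq : s + ((d : Int) + 1) = (s + d) + 1 := by ring
    rw [heq, h2]
    linarith

theorem prefAlt_mono (n R a b : Int) (hR : 1 ≤ R) (hn : R ≤ n)
    (ha : 0 ≤ a) (hab : a ≤ b) (hb : b ≤ 2 * R - 1) : prefAlt n R a ≤ prefAlt n R b := by
  have := prefAlt_mono_aux n R hR hn (b - a).toNat a ha (by omega)
  have hcast : a + ((b - a).toNat : Int) = b := by omega
  rwa [hcast] at this

-- the common answer, parameterised by the diagonal number ts
def ansOf (idx : Int) (n : Int) (R : Int) (ts : Int) : List Int :=
  let k := ts - (R - 1)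
  let offset := idx - prefAlt n R ts
  if k ≥ 0 then [offset, offset + k] else [offset - k, offset]

theorem scanA_of (idx n R ts : Int) (hR : 1 ≤ R) (hn : R ≤ n)
    (hts0 : 0 ≤ ts) (hts1 : ts ≤ 2 * R - 2)
    (hlo : prefAlt n R ts ≤ idx ∨ ts = 0) (hhi : idx < prefAlt n R (ts + 1)) :
    ∀ d : Nat, ∀ t : Int, 0 ≤ t → t + d = ts →
      vectorScanA idx n R (t - (R - 1)) (prefAlt n R t) = some (ansOf idx n R ts) := by
  intro d
  induction d with
  | zero =>
    intro t ht0 hteq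
    have ht : t = ts := by omega
    subst ht
    rw [vectorScanA]
    rw [if_pos (by omega : t - (R - 1) < R)]
    rw [if_pos (by have := prefAlt_succ n R t hR ht0 (by omega); omega :
      idx < prefAlt n R t + (n - |t - (R - 1)|))]
    simp only [ansOf]
    split <;> rfl
  | succ d ih =>
    intro t ht0 hteq
    have hlt : t < ts := by omega
    rw [vectorScanA]
    rw [if_pos (by omega : t - (R - 1) < R)]
    have hsucc := prefAlt_succ n R t hR ht0 (by omega)
    have hmono := prefAlt_mono n R (t + 1) ts hR hn (by omega) (by omega) (by omega)
    have hloi : prefAlt n R ts ≤ idx := by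
      rcases hlo with h | h
      · exact h
      · exact absurd hlt (by omega)
    rw [if_neg (by omega : ¬ idx < prefAlt n R t + (n - |t - (R - 1)|))]
    have := ih (t + 1) (by omega) (by omega)
    rw [show t - (R - 1) + 1 = t + 1 - (R - 1) from by ring, ← hsucc] at *
    exact this

theorem bsearchAlt_of (idx n R : Int) : ∀ fuel : Nat, ∀ lo hi : Int,
    (hi - lo).toNat ≤ fuel → 0 ≤ lo → lo < hi →
    (prefAlt n R lo ≤ idx ∨ lo = 0) → idx < prefAlt n R hi →
    lo ≤ bsearchAlt idx n R lo hi ∧ bsearchAlt idx n R lo hi + 1 ≤ hi ∧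
      (prefAlt n R (bsearchAlt idx n R lo hi) ≤ idx ∨ bsearchAlt idx n R lo hi = 0) ∧
      idx < prefAlt n R (bsearchAlt idx n R lo hi + 1) := by
  intro fuel
  induction fuel with
  | zero => intro lo hi hf _ hlt _ _; omega
  | succ fuel ih =>
    intro lo hi hf h0 hlt hlo hhi
    rw [bsearchAlt]
    by_cases hgap : hi - lo > 1
    · rw [dif_pos hgap]
      have hm1 : lo + 1 ≤ PySem.Int.floordiv (lo + hi) 2 := by
        rw [PySem.Int.le_floordiv_iff_mul_le (by omega : (0:Int) < 2)]; omega
      have hm2 : PySem.Int.floordiv (lo + hi) 2 < hi := by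
        rw [PySem.Int.floordiv_lt_iff_lt_mul (by omega : (0:Int) < 2)]; omega
      by_cases hc : prefAlt n R (PySem.Int.floordiv (lo + hi) 2) ≤ idx
      · simp only [if_pos hc]
        exact (fun h => ⟨by omega, h.2.1, h.2.2.1, h.2.2.2⟩)
          (ih (PySem.Int.floordiv (lo + hi) 2) hi (by omega) (by omega) (by omega) (Or.inl hc) hhi)
      · simp only [if_neg hc]
        have := ih lo (PySem.Int.floordiv (lo + hi) 2) (by omega) h0 (by omega) hlo (by omega)
        exact ⟨this.1, by omega, this.2.2.1, this.2.2.2⟩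
    · rw [dif_neg hgap]
      have : hi = lo + 1 := by omega
      subst this
      exact ⟨le_refl _, le_refl _, hlo, hhi⟩

theorem prefAlt_top (n R : Int) (hR : 1 ≤ R) :
    prefAlt n R (2 * R - 1) = (2 * R - 1) * n - R * (R - 1) := by
  obtain ⟨g, hg⟩ := Int.even_mul_succ_self (R - 1)
  by_cases h1 : R = 1
  · subst h1
    unfold prefAlt
    norm_num
  · unfold prefAlt
    rw [if_neg (by omega : ¬ 2 * R - 1 ≤ R),
      show R * (R - 1) + (2 * R - 1 - R) * (2 * R - 1 - R + 1) = 2 * (g + g) from by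
        linear_combination 2 * hg,
      floordiv_two_double]
    linear_combination hg

-- ===== VERDICT (by name: the statement is the Claim_ definition above) =====
theorem vector_index_to_matrix_indices_spec : Claim_equal_vector_index_to_matrix_indices := by
  intro idx n R _ hPre
  obtain ⟨hR, hn, hidx⟩ := hPre
  unfold Spec_vector_index_to_matrix_indices
  unfold vector_index_to_matrix_indices_alt
  rw [if_pos ⟨hR, hn, hidx⟩]
  have hb := bsearchAlt_of idx n R (2 * R - 1).toNat 0 (2 * R - 1) (by omega) (le_refl 0)
    (by omega) (Or.inr rfl) (by rw [prefAlt_top n R hR]; exact hidx)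
  obtain ⟨h1, h2, h3, h4⟩ := hb
  have hscan := scanA_of idx n R (bsearchAlt idx n R 0 (2 * R - 1)) hR hn (by omega) (by omega)
    h3 h4 (bsearchAlt idx n R 0 (2 * R - 1)).toNat 0 (le_refl 0) (by omega)
  rw [prefAlt_zero n R hR, show (0:Int) - (R - 1) = -R + 1 from by ring] at hscan
  unfold vector_index_to_matrix_indices
  rw [hscan, Option.getD_some]
  rfl
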